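-- pv_equiv track=rewrite | github.com/lucasfermo/CW | findSmallestSum.py | solution
-- ===== SOURCE A (Python) =====
-- def solution(a):
--     if len(a)==1:
--         return a[0]
--     minMod=min(a)
--     maxMod=max(a)
--     modList=[]
--     for i in range(1,25):
--         found=True
--         for j in a:
--             if j%i!=0:
--                 found=False
--         if found:
--             modList.append(i)
--     return max(modList)*len(a)
-- ===== SOURCE B (Python) =====
-- from math import gcd
-- from functools import reduce
--
-- def solution(a):
--     if len(a) == 1:
--         return a[0]
--     g = reduce(gcd, a)
--     for i in range(24, 0, -1):
--         if g % i == 0: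
--             return i * len(a)
-- ===== Notes on version B (the rewrite author's own statement) =====
-- stated objective: faster
-- what changed: Replaces the 24 nested scans of the whole list (one per candidate divisor) by a single gcd reduction of the list followed by a descending scan over 24..1 on the one gcd value, returning at the first divisor found.
-- outside the precondition, e.g. on solution([]): A raises ValueError, B raises TypeError
import Mathlib
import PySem

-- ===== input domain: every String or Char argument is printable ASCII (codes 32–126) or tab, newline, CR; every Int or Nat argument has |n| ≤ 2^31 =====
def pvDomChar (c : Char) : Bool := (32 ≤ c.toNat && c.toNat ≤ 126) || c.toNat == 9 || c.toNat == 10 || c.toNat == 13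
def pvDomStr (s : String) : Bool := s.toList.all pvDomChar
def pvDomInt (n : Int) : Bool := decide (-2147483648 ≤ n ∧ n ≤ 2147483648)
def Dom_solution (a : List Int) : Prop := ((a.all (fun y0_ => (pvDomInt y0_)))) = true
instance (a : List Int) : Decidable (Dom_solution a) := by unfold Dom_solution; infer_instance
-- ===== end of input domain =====

-- B replaces A's 24 full scans of the list (one per candidate divisor) by one gcd
-- reduction of the list followed by a descending divisor scan of the single gcd value.

-- ===== PORT A =====
def solution (a : List Int) : Int :=
  if a.length == 1 then (PySem.List.pyGet? a 0).getD 0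
  else
    let _minMod := PySem.List.min? a (fun x => x)   -- min(a): raises on []; Pre_ excludes []
    let _maxMod := PySem.List.max? a (fun x => x)
    let modList := (PySem.List.pyRange 1 25 1).foldl (fun acc i =>
      let found := a.foldl (fun found j => if PySem.Int.mod j i != 0 then false else found) true
      if found then acc ++ [i] else acc) []
    (PySem.List.max? modList (fun x => x)).getD 0 * a.length

-- ===== PORT B =====
def solution_alt (a : List Int) : Int :=
  if a.length == 1 then (PySem.List.pyGet? a 0).getD 0
  else
    match a with
    | [] => 0   -- unreachable under Pre_ (reduce on the empty list raises)
    | h :: t =>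
      let g : Int := t.foldl (fun acc x => ((Int.gcd acc x : Nat) : Int)) h
      ((PySem.List.pyRange 24 0 (-1)).find? (fun i => PySem.Int.mod g i == 0)).getD 0
        * a.length

-- ===== PRECONDITION & SPEC =====
-- A raises ValueError (min of empty sequence) on []; B raises there too.
def Pre_solution (a : List Int) : Prop := a ≠ []
instance (a : List Int) : Decidable (Pre_solution a) := by unfold Pre_solution; infer_instance
def pvWitness_solution : List Int := [12, 24, 36]

def Spec_solution (a : List Int) (out : Int) : Prop := out = solution_alt a
instance (a : List Int) (out : Int) : Decidable (Spec_solution a out) := by unfold Spec_solution; infer_instance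

-- ===== CLAIM (what is proved, stated in full; the proofs are below) =====
def Claim_equal_solution : Prop := ∀ (a : List Int), Dom_solution a → Pre_solution a → Spec_solution a (solution a)

-- ===== LEMMAS AND PROOFS =====

-- A's inner loop over the list is the 'all divisible' test.
theorem found_fold_eq_all (i : Int) (l : List Int) (b : Bool) :
    l.foldl (fun found j => if PySem.Int.mod j i != 0 then false else found) b
      = (b && l.all (fun j => PySem.Int.mod j i == 0)) := by
  induction l generalizing b with
  | nil => simp
  | cons x t ih =>
    simp only [List.foldl_cons, List.all_cons, ih]
    by_cases hx : PySem.Int.mod x i = 0 <;> simp [hx]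

theorem mod_beq_zero_eq_decide_dvd (j i : Int) : (PySem.Int.mod j i == 0) = decide (i ∣ j) := by
  rw [Bool.eq_iff_iff]; simp [PySem.Int.mod_eq_zero_iff_dvd]

theorem dvd_int_gcd_iff (i m n : Int) : i ∣ ((Int.gcd m n : Nat) : Int) ↔ i ∣ m ∧ i ∣ n := by
  constructor
  · intro h
    exact ⟨h.trans (Int.gcd_dvd_left m n), h.trans (Int.gcd_dvd_right m n)⟩
  · rintro ⟨h1, h2⟩
    have hd : i.natAbs ∣ Int.gcd m n :=
      Nat.dvd_gcd (Int.natAbs_dvd_natAbs.mpr h1) (Int.natAbs_dvd_natAbs.mpr h2)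
    exact Int.natAbs_dvd.mp (Int.natCast_dvd_natCast.mpr hd)

theorem dvd_gcd_fold_iff (t : List Int) (h i : Int) :
    i ∣ (t.foldl (fun acc x => ((Int.gcd acc x : Nat) : Int)) h)
      ↔ (i ∣ h ∧ ∀ j ∈ t, i ∣ j) := by
  induction t generalizing h with
  | nil => simp
  | cons x t ih =>
    simp only [List.foldl_cons, ih, dvd_int_gcd_iff, List.mem_cons]
    constructor
    · rintro ⟨⟨hh, hx⟩, ht⟩
      exact ⟨hh, fun j hj => hj.elim (fun e => e ▸ hx) (ht j)⟩
    · rintro ⟨hh, ht⟩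
      exact ⟨⟨hh, ht x (Or.inl rfl)⟩, fun j hj => ht j (Or.inr hj)⟩

theorem foldl_max_le (l : List Int) (z x : Int) (hz : z ≤ x) (hl : ∀ y ∈ l, y ≤ x) :
    l.foldl max z ≤ x := by
  induction l generalizing z with
  | nil => exact hz
  | cons y t ih =>
    exact ih (max z y) (max_le hz (hl y (List.mem_cons_self)))
      (fun w hw => hl w (List.mem_cons_of_mem _ hw))

-- On a strictly increasing list, max of the kept elements = first kept element from the right.
theorem max_filter_eq_find_reverse (l : List Int) (q : Int → Bool)
    (hs : l.Pairwise (· < ·)) :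
    PySem.List.max? (l.filter q) (fun x => x) = l.reverse.find? q := by
  induction l using List.reverseRecOn with
  | nil => simp [PySem.List.max?]
  | append_singleton l' x ih =>
    rw [List.pairwise_append] at hs
    obtain ⟨hp, -, hlt⟩ := hs
    have hlt' : ∀ y ∈ l', y < x := fun y hy => hlt y hy x (List.mem_singleton_self x)
    rw [List.reverse_append]
    simp only [List.reverse_singleton, List.singleton_append, List.filter_append]
    by_cases hq : q x = true
    · simp only [List.find?_cons, hq, List.filter_singleton]
      rcases hf : l'.filter q with _ | ⟨z, zs⟩
      · simp [PySem.List.max?_id_cons]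
      · rw [List.cons_append, PySem.List.max?_id_cons, List.foldl_append]
        have hmem : ∀ y ∈ l'.filter q, y ≤ x := by
          intro y hy
          exact le_of_lt (hlt' y (List.mem_of_mem_filter hy))
        have hz : z ≤ x := hmem z (hf ▸ List.mem_cons_self)
        have hzs : ∀ y ∈ zs, y ≤ x := fun y hy => hmem y (hf ▸ List.mem_cons_of_mem _ hy)
        simp [max_eq_right (foldl_max_le zs z x hz hzs)]
    · simp only [List.find?_cons, Bool.not_eq_true] at *
      simp [hq, ih hp]

theorem find?_congr_pred (l : List Int) (p q : Int → Bool)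
    (h : ∀ x ∈ l, p x = q x) : l.find? p = l.find? q := by
  induction l with
  | nil => rfl
  | cons x t ih =>
    simp only [List.find?_cons, h x (List.mem_cons_self)]
    split <;> [rfl; exact ih (fun y hy => h y (List.mem_cons_of_mem _ hy))]

-- ===== VERDICT (by name: the statement is the Claim_ definition above) =====
theorem solution_spec : Claim_equal_solution := by
  intro a _hdom hpre
  unfold Spec_solution
  obtain _ | ⟨h, t⟩ := a
  · exact absurd rfl hpre
  by_cases hlen : ((h :: t).length == 1) = true
  · unfold solution solution_alt
    rw [if_pos hlen, if_pos hlen]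
  · set g : Int := t.foldl (fun acc x => ((Int.gcd acc x : Nat) : Int)) h with hg
    have hq : ∀ i : Int,
        ((h :: t).foldl (fun found j => if PySem.Int.mod j i != 0 then false else found) true)
          = decide (i ∣ g) := by
      intro i
      rw [found_fold_eq_all, Bool.true_and]
      simp only [List.all_cons, mod_beq_zero_eq_decide_dvd]
      rw [Bool.eq_iff_iff, hg]
      simp [List.all_eq_true, dvd_gcd_fold_iff]
    have hA : solution (h :: t)
        = (PySem.List.max? ((PySem.List.pyRange 1 25 1).filter (fun i => decide (i ∣ g)))
            (fun x => x)).getD 0 * ((h :: t).length : Int) := by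
      unfold solution
      rw [if_neg (by simpa using hlen)]
      simp only [hq]
      rw [PySem.List.foldl_append_if_eq_filter, List.nil_append]
    have hrev : PySem.List.pyRange 24 0 (-1) = (PySem.List.pyRange 1 25 1).reverse := by
      have := PySem.List.pyRange_neg_one_eq_reverse 24 0
      norm_num at this
      exact this
    have hB : solution_alt (h :: t)
        = ((PySem.List.pyRange 1 25 1).reverse.find? (fun i => decide (i ∣ g))).getD 0
            * ((h :: t).length : Int) := by
      unfold solution_alt
      rw [if_neg (by simpa using hlen)]
      show ((PySem.List.pyRange 24 0 (-1)).find? (fun i => PySem.Int.mod g i == 0)).getD 0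
            * ((h :: t).length : Int) = _
      rw [hrev, find?_congr_pred _ _ _ (fun x _ => mod_beq_zero_eq_decide_dvd g x)]
    rw [hA, hB, max_filter_eq_find_reverse _ _ (PySem.List.pairwise_lt_pyRange_one 1 25)]
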